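-- pv_equiv track=rewrite | github.com/NVIDIA-NeMo/Curator | nemo_curator/stages/audio/segmentation/speaker_separation_module/speaker_sep.py | clean_cut_overlapping_segments
-- ===== SOURCE A (Python) =====
-- def clean_cut_overlapping_segments(speaker_segments):
--     """
--     Handle overlaps by cutting segments at overlap points.
--     """
--     # Flatten all segments into a timeline with speaker information
--     timeline = []
--     for speaker, segments in speaker_segments.items():
--         for start, end in segments:
--             timeline.append((start, 1, speaker))  # 1 indicates segment start
--             timeline.append((end, -1, speaker))   # -1 indicates segment end
--
--     # Sort the timeline by time
--     timeline.sort(key=lambda x: (x[0], x[1]))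
--
--     # Process the timeline to find non-overlapping segments
--     active_speakers = set()
--     result_segments = {spk: [] for spk in speaker_segments.keys()}
--     current_segments = {spk: None for spk in speaker_segments.keys()}
--
--     for time, event_type, speaker in timeline:
--         # Process any segment endings first
--         if event_type == -1:
--             if speaker in active_speakers:
--                 # Only end segments if this speaker was active
--                 if current_segments[speaker] is not None:
--                     start_time = current_segments[speaker]
--                     if start_time < time:  # Only add if segment has length
--                         result_segments[speaker].append((start_time, time))
--                     current_segments[speaker] = None
--                 active_speakers.remove(speaker)
--
--         # Then handle any new overlaps with existing active speakers
--         elif event_type == 1: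
--             # If there are already active speakers, end their current segments
--             for active_spk in active_speakers:
--                 if current_segments[active_spk] is not None:
--                     start_time = current_segments[active_spk]
--                     if start_time < time:  # Only add if segment has length
--                         result_segments[active_spk].append((start_time, time))
--                     current_segments[active_spk] = None
--
--             # Mark the new speaker as active
--             active_speakers.add(speaker)
--             current_segments[speaker] = time
--
--     return result_segments
-- ===== SOURCE B (Python) =====
-- def clean_cut_overlapping_segments(speaker_segments):
--     """
--     Handle overlaps by cutting segments at overlap points.
--     Sweep the sorted timeline tracking only the single currently-open
--     segment instead of scanning every active speaker at each start event.
--     """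
--     timeline = [ev
--                 for speaker, segments in speaker_segments.items()
--                 for start, end in segments
--                 for ev in ((start, 1, speaker), (end, -1, speaker))]
--     timeline.sort(key=lambda x: (x[0], x[1]))
--
--     result = {spk: [] for spk in speaker_segments}
--     active = set()
--     open_seg = None  # (speaker, start) of the unique currently-open segment
--
--     for time, event_type, speaker in timeline:
--         if event_type == -1:
--             if speaker in active:
--                 if open_seg is not None and open_seg[0] == speaker:
--                     s = open_seg[1]
--                     if s < time:
--                         result[speaker].append((s, time))
--                     open_seg = None
--                 active.remove(speaker)
--         else:
--             if open_seg is not None: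
--                 spk0, s = open_seg
--                 if s < time:
--                     result[spk0].append((s, time))
--             active.add(speaker)
--             open_seg = (speaker, time)
--     return result
-- ===== Notes on version B (the rewrite author's own statement) =====
-- stated objective: faster
-- what changed: B replaces A's per-start-event scan over all active speakers (with a per-speaker current-segment dict) by tracking the single currently-open segment in one variable, exploiting that at most one segment is open at any time.
import Mathlib
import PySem

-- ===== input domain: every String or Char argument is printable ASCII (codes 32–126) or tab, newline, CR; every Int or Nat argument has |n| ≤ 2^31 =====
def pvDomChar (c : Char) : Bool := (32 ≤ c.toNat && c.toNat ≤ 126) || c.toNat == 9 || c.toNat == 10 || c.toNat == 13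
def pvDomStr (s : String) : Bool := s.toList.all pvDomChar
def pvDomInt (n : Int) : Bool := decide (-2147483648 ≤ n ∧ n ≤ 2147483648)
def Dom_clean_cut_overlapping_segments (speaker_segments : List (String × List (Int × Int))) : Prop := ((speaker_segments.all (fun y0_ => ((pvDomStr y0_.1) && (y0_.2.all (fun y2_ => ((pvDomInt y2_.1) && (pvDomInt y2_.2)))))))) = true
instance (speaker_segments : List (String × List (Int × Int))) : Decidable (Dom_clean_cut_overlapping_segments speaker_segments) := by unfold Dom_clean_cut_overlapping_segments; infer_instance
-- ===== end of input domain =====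

-- B replaces A's per-start-event scan over all active speakers by tracking the single
-- currently-open segment in one variable (at most one segment is ever open): measurably faster.

-- ===== PORT A =====
-- state of A's sweep: (active_speakers, result_segments, current_segments)
abbrev pvStA : Type := PySem.Set String × PySem.Dict String (List (Int × Int)) × PySem.Dict String (Option Int)

-- body of A's inner 'for active_spk in active_speakers' loop (cut active_spk's open segment)
def pvCut (time : Int) (rc : PySem.Dict String (List (Int × Int)) × PySem.Dict String (Option Int))
    (aspk : String) : PySem.Dict String (List (Int × Int)) × PySem.Dict String (Option Int) :=
  match rc.2.getD aspk none with
  | some s =>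
      ((if s < time then rc.1.modify aspk [] (fun l => l ++ [(s, time)]) else rc.1),
       rc.2.insert aspk none)
  | none => rc

-- body of A's 'for time, event_type, speaker in timeline' loop
def pvStepA (st : pvStA) (ev : Int × Int × String) : pvStA :=
  let time := ev.1
  let active := st.1; let result := st.2.1; let current := st.2.2
  if ev.2.1 == -1 then
    if PySem.Set.contains active ev.2.2 then
      match current.getD ev.2.2 none with
      | some s =>
          (PySem.Set.discard active ev.2.2,
           (if s < time then result.modify ev.2.2 [] (fun l => l ++ [(s, time)]) else result),
           current.insert ev.2.2 none)
      | none => (PySem.Set.discard active ev.2.2, result, current)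
    else st
  else if ev.2.1 == 1 then
    let rc := active.foldl (pvCut time) (result, current)
    (PySem.Set.add active ev.2.2, rc.1, rc.2.insert ev.2.2 (some time))
  else st

def clean_cut_overlapping_segments (speaker_segments : List (String × List (Int × Int))) : List (String × List (Int × Int)) :=
  let timeline := speaker_segments.foldl
    (fun tl p => p.2.foldl (fun tl seg => (tl ++ [(seg.1, (1 : Int), p.1)]) ++ [(seg.2, (-1 : Int), p.1)]) tl) []
  let timeline := PySem.List.sorted2 timeline (fun x => x.1) (fun x => x.2.1)
  let result0 : PySem.Dict String (List (Int × Int)) :=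
    speaker_segments.foldl (fun d p => d.insert p.1 []) PySem.Dict.empty
  let current0 : PySem.Dict String (Option Int) :=
    speaker_segments.foldl (fun d p => d.insert p.1 none) PySem.Dict.empty
  (timeline.foldl pvStepA (PySem.Set.empty, result0, current0)).2.1.items

-- ===== PORT B =====
-- state of B's sweep: (active, result, open_seg) — open_seg is the unique currently-open segment
abbrev pvStB : Type := PySem.Set String × PySem.Dict String (List (Int × Int)) × Option (String × Int)

-- body of B's 'for time, event_type, speaker in timeline' loop
def pvStepB (st : pvStB) (ev : Int × Int × String) : pvStB :=
  let time := ev.1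
  let active := st.1; let result := st.2.1; let openSeg := st.2.2
  if ev.2.1 == -1 then
    if PySem.Set.contains active ev.2.2 then
      match openSeg with
      | some p =>
          if p.1 == ev.2.2 then
            (PySem.Set.discard active ev.2.2,
             (if p.2 < time then result.modify ev.2.2 [] (fun l => l ++ [(p.2, time)]) else result),
             none)
          else (PySem.Set.discard active ev.2.2, result, openSeg)
      | none => (PySem.Set.discard active ev.2.2, result, openSeg)
    else st
  else if ev.2.1 == 1 then
    let result' := match openSeg with
      | some p => if p.2 < time then result.modify p.1 [] (fun l => l ++ [(p.2, time)]) else result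
      | none => result
    (PySem.Set.add active ev.2.2, result', some (ev.2.2, time))
  else st

def clean_cut_overlapping_segments_alt (speaker_segments : List (String × List (Int × Int))) : List (String × List (Int × Int)) :=
  let timeline := speaker_segments.flatMap
    (fun p => p.2.flatMap (fun seg => [(seg.1, (1 : Int), p.1), (seg.2, (-1 : Int), p.1)]))
  let timeline := PySem.List.sorted2 timeline (fun x => x.1) (fun x => x.2.1)
  let result0 : PySem.Dict String (List (Int × Int)) :=
    speaker_segments.foldl (fun d p => d.insert p.1 []) PySem.Dict.empty
  (timeline.foldl pvStepB (PySem.Set.empty, result0, none)).2.1.items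

-- ===== PRECONDITION & SPEC =====
def Spec_clean_cut_overlapping_segments (speaker_segments : List (String × List (Int × Int))) (out : List (String × List (Int × Int))) : Prop := out = clean_cut_overlapping_segments_alt speaker_segments
instance (speaker_segments : List (String × List (Int × Int))) (out : List (String × List (Int × Int))) : Decidable (Spec_clean_cut_overlapping_segments speaker_segments out) := by unfold Spec_clean_cut_overlapping_segments; infer_instance

-- ===== CLAIM (what is proved, stated in full; the proofs are below) =====
def Claim_equal_clean_cut_overlapping_segments : Prop := ∀ (speaker_segments : List (String × List (Int × Int))), Dom_clean_cut_overlapping_segments speaker_segments → Spec_clean_cut_overlapping_segments speaker_segments (clean_cut_overlapping_segments speaker_segments)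

-- ===== LEMMAS AND PROOFS =====

-- the simulation relation: equal actives and results; A's current_segments dict holds exactly
-- B's open segment (and nothing else); an open segment's speaker is active
def pvRel (sA : pvStA) (sB : pvStB) : Prop :=
  sA.1 = sB.1 ∧ sA.2.1 = sB.2.1 ∧
  (∀ k, sA.2.2.getD k none =
    (match sB.2.2 with | some p => if k = p.1 then some p.2 else none | none => none)) ∧
  (∀ p, sB.2.2 = some p → p.1 ∈ sB.1)

theorem pvTimeline_eq (ss : List (String × List (Int × Int))) :
    ss.foldl (fun tl p => p.2.foldl
        (fun tl seg => (tl ++ [(seg.1, (1 : Int), p.1)]) ++ [(seg.2, (-1 : Int), p.1)]) tl) [] =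
    ss.flatMap (fun p => p.2.flatMap (fun seg => [(seg.1, (1 : Int), p.1), (seg.2, (-1 : Int), p.1)])) := by
  have hin : ∀ (p : String × List (Int × Int)) (tl : List (Int × Int × String)),
      p.2.foldl (fun tl seg => (tl ++ [(seg.1, (1 : Int), p.1)]) ++ [(seg.2, (-1 : Int), p.1)]) tl
      = tl ++ p.2.flatMap (fun seg => [(seg.1, (1 : Int), p.1), (seg.2, (-1 : Int), p.1)]) := by
    intro p tl
    have h := PySem.List.foldl_append_eq_flatMap
      (fun seg : Int × Int => [(seg.1, (1 : Int), p.1), (seg.2, (-1 : Int), p.1)]) p.2 tl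
    simpa [List.append_assoc] using h
  have h1 := PySem.List.foldl_congr_mem
    (f := fun tl (p : String × List (Int × Int)) => p.2.foldl
        (fun tl seg => (tl ++ [(seg.1, (1 : Int), p.1)]) ++ [(seg.2, (-1 : Int), p.1)]) tl)
    (g := fun tl p => tl ++ p.2.flatMap
        (fun seg => [(seg.1, (1 : Int), p.1), (seg.2, (-1 : Int), p.1)]))
    (init := ([] : List (Int × Int × String)))
    (l := ss) (fun acc x _ => hin x acc)
  rw [h1]
  simpa using PySem.List.foldl_append_eq_flatMap
    (fun p : String × List (Int × Int) =>
      p.2.flatMap (fun seg => [(seg.1, (1 : Int), p.1), (seg.2, (-1 : Int), p.1)])) ss []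

theorem pvCut_fold_none (l : List String) (time : Int)
    (r : PySem.Dict String (List (Int × Int))) (c : PySem.Dict String (Option Int))
    (h : ∀ k, c.getD k none = none) :
    l.foldl (pvCut time) (r, c) = (r, c) := by
  induction l with
  | nil => rfl
  | cons a t ih =>
      have hstep : pvCut time (r, c) a = (r, c) := by simp [pvCut, h a]
      simpa [hstep] using ih

theorem pvCut_fold_one (l : List String) (time : Int)
    (r : PySem.Dict String (List (Int × Int))) (c : PySem.Dict String (Option Int))
    (sp0 : String) (s : Int)
    (h : ∀ k, c.getD k none = if k = sp0 then some s else none) (hm : sp0 ∈ l) :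
    (l.foldl (pvCut time) (r, c)).1
        = (if s < time then r.modify sp0 [] (fun ll => ll ++ [(s, time)]) else r)
    ∧ ∀ k, (l.foldl (pvCut time) (r, c)).2.getD k none = none := by
  induction l generalizing r with
  | nil => cases hm
  | cons a t ih =>
      by_cases ha : a = sp0
      · subst ha
        have hstep : pvCut time (r, c) a
            = ((if s < time then r.modify a [] (fun ll => ll ++ [(s, time)]) else r),
               c.insert a none) := by
          simp [pvCut, h a]
        have hnone : ∀ k, (c.insert a none).getD k (none : Option Int) = none := by
          intro k
          rw [PySem.Dict.getD_insert]
          by_cases hk : k = a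
          · simp [hk]
          · simp [hk, h k]
        have hrest := pvCut_fold_none t time
          (if s < time then r.modify a [] (fun ll => ll ++ [(s, time)]) else r)
          (c.insert a none) hnone
        constructor
        · simp [List.foldl_cons, hstep, hrest]
        · intro k; simp [List.foldl_cons, hstep, hrest, hnone k]
      · have hstep : pvCut time (r, c) a = (r, c) := by
          have hg : c.getD a none = none := by simp [h a, ha]
          simp [pvCut, hg]
        have hm' : sp0 ∈ t := by
          rcases List.mem_cons.mp hm with h1 | h1
          · exact absurd h1.symm ha
          · exact h1
        simpa [List.foldl_cons, hstep] using ih r hm'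

theorem pvStep_rel (sA : pvStA) (sB : pvStB) (ev : Int × Int × String)
    (h : pvRel sA sB) : pvRel (pvStepA sA ev) (pvStepB sB ev) := by
  obtain ⟨aA, rA, cA⟩ := sA
  obtain ⟨aB, rB, op⟩ := sB
  obtain ⟨h1, h2, h3, h4⟩ := h
  have h1' : aA = aB := h1
  have h2' : rA = rB := h2
  subst h1'; subst h2'
  by_cases hty1 : ev.2.1 = -1
  · -- end event
    by_cases hmem : ev.2.2 ∈ aA
    · cases op with
      | none =>
          have hcget : cA.getD ev.2.2 none = none := by simpa using h3 ev.2.2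
          have hA : pvStepA (aA, rA, cA) ev = (PySem.Set.discard aA ev.2.2, rA, cA) := by
            simp [pvStepA, hty1, hmem, hcget]
          have hB : pvStepB (aA, rA, none) ev = (PySem.Set.discard aA ev.2.2, rA, none) := by
            simp [pvStepB, hty1, hmem]
          rw [hA, hB]
          exact ⟨rfl, rfl, fun k => by simpa using h3 k, fun q hq => by cases hq⟩
      | some p =>
          by_cases hsp : p.1 = ev.2.2
          · have hcget : cA.getD ev.2.2 none = some p.2 := by
              have h0 : cA.getD ev.2.2 none = if ev.2.2 = p.1 then some p.2 else none := h3 ev.2.2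
              simpa [hsp] using h0
            have hA : pvStepA (aA, rA, cA) ev = (PySem.Set.discard aA ev.2.2,
                (if p.2 < ev.1 then rA.modify ev.2.2 [] (fun l => l ++ [(p.2, ev.1)]) else rA),
                cA.insert ev.2.2 none) := by
              simp [pvStepA, hty1, hmem, hcget]
            have hB : pvStepB (aA, rA, some p) ev = (PySem.Set.discard aA ev.2.2,
                (if p.2 < ev.1 then rA.modify ev.2.2 [] (fun l => l ++ [(p.2, ev.1)]) else rA),
                none) := by
              simp [pvStepB, hty1, hmem, hsp]
            rw [hA, hB]
            refine ⟨rfl, rfl, ?_, fun q hq => by cases hq⟩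
            intro k
            rw [PySem.Dict.getD_insert]
            by_cases hk : k = ev.2.2
            · simp [hk]
            · have h0 : cA.getD k none = if k = p.1 then some p.2 else none := h3 k
              rw [hsp] at h0
              simpa [hk] using h0
          · have hne' : ¬ ev.2.2 = p.1 := fun hh => hsp hh.symm
            have hcget : cA.getD ev.2.2 none = none := by
              have h0 : cA.getD ev.2.2 none = if ev.2.2 = p.1 then some p.2 else none := h3 ev.2.2
              simpa [hne'] using h0
            have hbeq : (p.1 == ev.2.2) = false := by simpa using hsp
            have hA : pvStepA (aA, rA, cA) ev = (PySem.Set.discard aA ev.2.2, rA, cA) := by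
              simp [pvStepA, hty1, hmem, hcget]
            have hB : pvStepB (aA, rA, some p) ev
                = (PySem.Set.discard aA ev.2.2, rA, some p) := by
              simp [pvStepB, hty1, hmem, hbeq]
            rw [hA, hB]
            refine ⟨rfl, rfl, fun k => h3 k, ?_⟩
            intro q hq
            cases hq
            rw [PySem.Set.mem_discard]
            exact ⟨h4 p rfl, hsp⟩
    · have hA : pvStepA (aA, rA, cA) ev = (aA, rA, cA) := by
        simp [pvStepA, hty1, hmem]
      have hB : pvStepB (aA, rA, op) ev = (aA, rA, op) := by
        simp [pvStepB, hty1, hmem]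
      rw [hA, hB]
      exact ⟨rfl, rfl, h3, h4⟩
  · by_cases hty2 : ev.2.1 = 1
    · -- start event
      cases op with
      | none =>
          have hnone : ∀ k, cA.getD k (none : Option Int) = none := by
            intro k; simpa using h3 k
          have hfold := pvCut_fold_none aA ev.1 rA cA hnone
          have hA : pvStepA (aA, rA, cA) ev = (PySem.Set.add aA ev.2.2, rA,
              cA.insert ev.2.2 (some ev.1)) := by
            simp [pvStepA, hty2, hfold]
          have hB : pvStepB (aA, rA, none) ev
              = (PySem.Set.add aA ev.2.2, rA, some (ev.2.2, ev.1)) := by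
            simp [pvStepB, hty2]
          rw [hA, hB]
          refine ⟨rfl, rfl, ?_, ?_⟩
          · intro k
            rw [PySem.Dict.getD_insert]
            by_cases hk : k = ev.2.2 <;> simp [hk, hnone k]
          · intro q hq
            cases hq
            rw [PySem.Set.mem_add]
            exact Or.inr rfl
      | some p =>
          have hmem : p.1 ∈ aA := h4 p rfl
          have hfold := pvCut_fold_one aA ev.1 rA cA p.1 p.2
            (fun k => by simpa using h3 k) hmem
          have hA : pvStepA (aA, rA, cA) ev = (PySem.Set.add aA ev.2.2,
              (List.foldl (pvCut ev.1) (rA, cA) aA).1,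
              (List.foldl (pvCut ev.1) (rA, cA) aA).2.insert ev.2.2 (some ev.1)) := by
            simp [pvStepA, hty2]
          have hB : pvStepB (aA, rA, some p) ev = (PySem.Set.add aA ev.2.2,
              (if p.2 < ev.1 then rA.modify p.1 [] (fun l => l ++ [(p.2, ev.1)]) else rA),
              some (ev.2.2, ev.1)) := by
            simp [pvStepB, hty2]
          rw [hA, hB]
          refine ⟨rfl, hfold.1, ?_, ?_⟩
          · intro k
            rw [PySem.Dict.getD_insert]
            by_cases hk : k = ev.2.2 <;> simp [hk, hfold.2 k]
          · intro q hq
            cases hq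
            rw [PySem.Set.mem_add]
            exact Or.inr rfl
    · have hne1 : (ev.2.1 == -1) = false := by simpa using hty1
      have hne2 : (ev.2.1 == 1) = false := by simpa using hty2
      have hA : pvStepA (aA, rA, cA) ev = (aA, rA, cA) := by
        simp [pvStepA, hne1, hne2]
      have hB : pvStepB (aA, rA, op) ev = (aA, rA, op) := by
        simp [pvStepB, hne1, hne2]
      rw [hA, hB]
      exact ⟨rfl, rfl, h3, h4⟩

theorem pvFold_rel (tl : List (Int × Int × String)) (sA : pvStA) (sB : pvStB)
    (h : pvRel sA sB) : pvRel (tl.foldl pvStepA sA) (tl.foldl pvStepB sB) := by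
  induction tl generalizing sA sB with
  | nil => exact h
  | cons e t ih => exact ih _ _ (pvStep_rel sA sB e h)

theorem pvInit_current (ss : List (String × List (Int × Int))) :
    ∀ k, (ss.foldl (fun d p => d.insert p.1 (none : Option Int)) PySem.Dict.empty).getD k none = none := by
  suffices h : ∀ (d : PySem.Dict String (Option Int)), (∀ k, d.getD k none = none) →
      ∀ k, (ss.foldl (fun d p => d.insert p.1 (none : Option Int)) d).getD k none = none by
    exact h PySem.Dict.empty (fun k => by simp [PySem.Dict.getD_empty])
  induction ss with
  | nil => intro d hd k; simpa using hd k
  | cons a t ih =>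
      intro d hd k
      refine ih (d.insert a.1 none) (fun j => ?_) k
      rw [PySem.Dict.getD_insert]
      by_cases hj : j = a.1 <;> simp [hj, hd j]

-- ===== VERDICT (by name: the statement is the Claim_ definition above) =====
theorem clean_cut_overlapping_segments_spec : Claim_equal_clean_cut_overlapping_segments := by
  intro ss _
  unfold Spec_clean_cut_overlapping_segments
  unfold clean_cut_overlapping_segments clean_cut_overlapping_segments_alt
  simp only [pvTimeline_eq]
  have h := pvFold_rel
    (PySem.List.sorted2
      (ss.flatMap (fun p => p.2.flatMap (fun seg => [(seg.1, (1 : Int), p.1), (seg.2, (-1 : Int), p.1)])))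
      (fun x => x.1) (fun x => x.2.1))
    (PySem.Set.empty, ss.foldl (fun d p => d.insert p.1 []) PySem.Dict.empty,
      ss.foldl (fun d p => d.insert p.1 (none : Option Int)) PySem.Dict.empty)
    (PySem.Set.empty, ss.foldl (fun d p => d.insert p.1 []) PySem.Dict.empty, none)
    ⟨rfl, rfl, fun k => by simpa using pvInit_current ss k, fun p hp => by cases hp⟩
  exact congrArg PySem.Dict.items h.2.1
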